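-- pv_equiv track=rewrite | github.com/choijaehoon1/programmers_level | src/test118_02.py | solution
-- ===== SOURCE A (Python) =====
-- def binary(n):
--     tmp = ''
--     while n > 0:
--         t = n % 2
--         tmp = str(t) + tmp
--         n //= 2
--     return tmp
--
-- def solution(numbers):
--     answer = []
--     for number in numbers:
--         bi = binary(number)
--         bi = '0' + bi
--         new_bi = bi
--         bi = list(bi)
--         new_bi = list(new_bi)
--
--         idx = 0
--         for i in range(len(bi)-1,-1,-1):
--             if bi[i] == '0':
--                 new_bi[i] = '1'
--                 idx = i
--                 break
--
--         if idx + 1 < len(new_bi):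
--             new_bi[idx+1] = '0'
--
--         tmp = 0
--         for i in range(len(new_bi)-1,-1,-1):
--             tmp += int(new_bi[i]) * 2**(len(new_bi)-1-i)
--         answer.append(tmp)
--
--     return answer
-- ===== SOURCE B (Python) =====
-- def solution(numbers):
--     out = []
--     for n in numbers:
--         if n <= 0:
--             # binary() yields the empty string for non-positive n, so A returns 1 here
--             out.append(1)
--         else:
--             low = 1
--             m = n
--             while m % 2 == 1:
--                 m //= 2
--                 low *= 2
--             out.append(n + low - low // 2)
--     return out
-- ===== Notes on version B (the rewrite author's own statement) =====
-- stated objective: faster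
-- what changed: B replaces A's binary-string construction, index scans and power-sum reconversion by pure integer arithmetic: strip trailing one-bits to get low = 2^k, then return n + low - low//2.
import Mathlib
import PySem

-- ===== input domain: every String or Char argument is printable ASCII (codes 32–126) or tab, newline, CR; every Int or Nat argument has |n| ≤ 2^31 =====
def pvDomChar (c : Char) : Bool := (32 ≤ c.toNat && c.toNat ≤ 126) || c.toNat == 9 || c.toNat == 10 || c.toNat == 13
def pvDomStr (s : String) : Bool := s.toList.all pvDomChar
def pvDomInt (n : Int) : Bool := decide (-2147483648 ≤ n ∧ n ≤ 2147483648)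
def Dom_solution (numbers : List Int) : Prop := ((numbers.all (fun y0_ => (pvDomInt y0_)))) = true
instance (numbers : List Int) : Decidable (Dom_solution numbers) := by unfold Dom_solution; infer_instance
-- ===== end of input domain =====

-- B replaces A's binary-string build / rightmost-zero scan / power-sum reconversion by direct
-- integer arithmetic (strip trailing one-bits, then n + low - low//2); equivalence proved for all ints.

-- ===== PORT A =====
-- Python strings are ported as List Char (the PySem.Chars domain); 'str(t) + tmp' is toChars t ++ tmp.
def binaryAux (n : Int) (tmp : List Char) : List Char :=
  if _h : 0 < n then
    binaryAux (PySem.Int.floordiv n 2) (PySem.Int.toChars (PySem.Int.mod n 2) ++ tmp)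
  else tmp
termination_by n.toNat
decreasing_by
  rw [PySem.Int.floordiv_eq_ediv_of_pos (by norm_num : (0:Int) < 2)]
  omega

def binary (n : Int) : List Char := binaryAux n []

-- the for-i-in-range(len-1,-1,-1) scan with break: i counts down; first '0' is set to '1' and returned with its index
def scanA (bi newbi : List Char) (i idx : Int) : List Char × Int :=
  if h : 0 ≤ i then
    if PySem.List.pyGet? bi i = some '0' then (PySem.List.pySetD newbi i '1', i)
    else scanA bi newbi (i - 1) idx
  else (newbi, idx)
termination_by (i + 1).toNat
decreasing_by omega

-- the reconversion loop: tmp += int(new_bi[i]) * 2**(len-1-i), i from len-1 down to 0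
-- (the pyGetD default and the Option default of int() are unreachable: i is in range and the chars are '0'/'1')
def valA (l : List Char) (i tmp : Int) : Int :=
  if h : 0 ≤ i then
    valA l (i - 1)
      (tmp + (PySem.Int.ofChars? [PySem.List.pyGetD l i ' ']).getD 0 *
        2 ^ (PySem.List.len l - 1 - i).toNat)
  else tmp
termination_by (i + 1).toNat
decreasing_by omega

def stepA (number : Int) : Int :=
  let bi := '0' :: binary number
  let r := scanA bi bi (PySem.List.len bi - 1) 0
  let newbi := if r.2 + 1 < PySem.List.len r.1 then PySem.List.pySetD r.1 (r.2 + 1) '0' else r.1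
  valA newbi (PySem.List.len newbi - 1) 0

def solution (numbers : List Int) : List Int :=
  numbers.foldl (fun answer number => answer ++ [stepA number]) []

-- ===== PORT B =====
-- the while m % 2 == 1 loop ('0 < m' is only a totality guard: the loop is entered with m > 0 and keeps m ≥ 0)
def lowAux (m low : Int) : Int :=
  if h : 0 < m ∧ PySem.Int.mod m 2 = 1 then lowAux (PySem.Int.floordiv m 2) (low * 2) else low
termination_by m.toNat
decreasing_by
  rw [PySem.Int.floordiv_eq_ediv_of_pos (by norm_num : (0:Int) < 2)]
  omega

def nextNum (n : Int) : Int :=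
  if n ≤ 0 then 1
  else
    let low := lowAux n 1
    n + low - PySem.Int.floordiv low 2

def solution_alt (numbers : List Int) : List Int := numbers.map nextNum

-- ===== PRECONDITION & SPEC =====
def Spec_solution (numbers : List Int) (out : List Int) : Prop := out = solution_alt numbers
instance (numbers : List Int) (out : List Int) : Decidable (Spec_solution numbers out) := by unfold Spec_solution; infer_instance

-- ===== CLAIM (what is proved, stated in full; the proofs are below) =====
def Claim_equal_solution : Prop := ∀ (numbers : List Int), Dom_solution numbers → Spec_solution numbers (solution numbers)

-- ===== LEMMAS AND PROOFS =====

-- digit value of a char as A's int() computes it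
def digitA (c : Char) : Int := (PySem.Int.ofChars? [c]).getD 0

-- value of a most-significant-first digit string
def valChars (l : List Char) : Int := l.foldl (fun a c => 2 * a + digitA c) 0

theorem digitA_zero : digitA '0' = 0 := by decide
theorem digitA_one : digitA '1' = 1 := by decide

theorem valChars_foldl (t : List Char) : ∀ a : Int,
    t.foldl (fun a c => 2 * a + digitA c) a = a * 2 ^ t.length + valChars t := by
  induction t with
  | nil => intro a; simp [valChars]
  | cons c t ih =>
      intro a
      have hv : valChars (c :: t) = digitA c * 2 ^ t.length + valChars t := by
        simp only [valChars, List.foldl_cons]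
        rw [ih (2 * 0 + digitA c)]; norm_num; rfl
      simp only [List.foldl_cons, List.length_cons, hv]
      rw [ih (2 * a + digitA c)]
      ring

theorem valChars_append (s t : List Char) :
    valChars (s ++ t) = valChars s * 2 ^ t.length + valChars t := by
  simp only [valChars, List.foldl_append]
  exact valChars_foldl t _

theorem valChars_singleton (c : Char) : valChars [c] = digitA c := by
  simp [valChars]

theorem valChars_cons (c : Char) (t : List Char) :
    valChars (c :: t) = digitA c * 2 ^ t.length + valChars t := by
  rw [show c :: t = [c] ++ t from rfl, valChars_append, valChars_singleton]

theorem valChars_replicate_one (k : Nat) : valChars (List.replicate k '1') = 2 ^ k - 1 := by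
  induction k with
  | zero => simp [valChars]
  | succ k ih =>
      rw [List.replicate_succ, valChars_cons, List.length_replicate, ih, digitA_one]
      ring

theorem binaryAux_append (n : Int) (tmp : List Char) :
    binaryAux n tmp = binaryAux n [] ++ tmp := by
  conv_lhs => rw [binaryAux]
  conv_rhs => rw [binaryAux]
  simp only [List.append_nil]
  by_cases h : 0 < n
  · rw [dif_pos h, dif_pos h,
        binaryAux_append (PySem.Int.floordiv n 2) (PySem.Int.toChars (PySem.Int.mod n 2) ++ tmp),
        binaryAux_append (PySem.Int.floordiv n 2) (PySem.Int.toChars (PySem.Int.mod n 2))]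
    simp
  · rw [dif_neg h, dif_neg h]; simp
termination_by n.toNat
decreasing_by
  all_goals rw [PySem.Int.floordiv_eq_ediv_of_pos (by norm_num : (0:Int) < 2)]
  all_goals omega

theorem binary_nonpos {n : Int} (h : n ≤ 0) : binary n = [] := by
  rw [binary, binaryAux, dif_neg (by omega)]

theorem binary_pos {n : Int} (h : 0 < n) :
    binary n = binary (PySem.Int.floordiv n 2) ++ PySem.Int.toChars (PySem.Int.mod n 2) := by
  show binaryAux n [] = _
  rw [binaryAux, dif_pos h, binaryAux_append]
  simp [binary]

theorem mod_two_cases (n : Int) : PySem.Int.mod n 2 = 0 ∨ PySem.Int.mod n 2 = 1 := by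
  rw [PySem.Int.mod_eq_emod_of_pos (by norm_num : (0:Int) < 2)]
  omega

theorem valChars_binary (n : Int) (h : 0 ≤ n) : valChars (binary n) = n := by
  by_cases hp : 0 < n
  · have h2 : (0:Int) < 2 := by norm_num
    have hkey := PySem.Int.floordiv_mul_add_mod n 2
    have hrec : valChars (binary (PySem.Int.floordiv n 2)) = PySem.Int.floordiv n 2 :=
      valChars_binary (PySem.Int.floordiv n 2)
        (by rw [PySem.Int.floordiv_eq_ediv_of_pos h2]; omega)
    rw [binary_pos hp, valChars_append, hrec]
    rcases mod_two_cases n with hm | hm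
    · rw [hm, show PySem.Int.toChars (0:Int) = ['0'] from by decide, valChars_singleton, digitA_zero]
      rw [hm] at hkey
      simpa using hkey
    · rw [hm, show PySem.Int.toChars (1:Int) = ['1'] from by decide, valChars_singleton, digitA_one]
      rw [hm] at hkey
      simpa using hkey
  · have hn0 : n = 0 := by omega
    rw [hn0, binary_nonpos le_rfl]
    rfl
termination_by n.toNat
decreasing_by
  rw [PySem.Int.floordiv_eq_ediv_of_pos (by norm_num : (0:Int) < 2)]
  omega

theorem binary_decomp (k : Nat) (m : Int) (hm : 0 ≤ m) :
    binary (2 ^ k * m + 2 ^ k - 1) = binary m ++ List.replicate k '1' := by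
  induction k with
  | zero => norm_num
  | succ k ih =>
      have hpk : (0:Int) < 2 ^ k := by positivity
      have h1 : (1:Int) ≤ 2 ^ k := hpk
      have hmn : (0:Int) ≤ 2 ^ k * m := mul_nonneg hpk.le hm
      have harg : (2:Int) ^ (k+1) * m + 2 ^ (k+1) - 1 = 2 * (2 ^ k * m + 2 ^ k - 1) + 1 := by ring
      set x : Int := 2 ^ k * m + 2 ^ k - 1 with hxdef
      have hx : (0:Int) ≤ x := by rw [hxdef]; linarith
      have hf : PySem.Int.floordiv (2 * x + 1) 2 = x := by
        rw [PySem.Int.floordiv_eq_ediv_of_pos (by norm_num : (0:Int) < 2)]; omega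
      have hm1 : PySem.Int.mod (2 * x + 1) 2 = 1 := by
        rw [PySem.Int.mod_eq_emod_of_pos (by norm_num : (0:Int) < 2)]; omega
      rw [harg, binary_pos (by omega : (0:Int) < 2 * x + 1), hf, hm1, ih,
          show PySem.Int.toChars (1:Int) = ['1'] from by decide, List.replicate_succ']
      simp

theorem decomp (n : Int) (h : 0 ≤ n) :
    ∃ (k : Nat) (m : Int), 0 ≤ m ∧ PySem.Int.mod m 2 = 0 ∧ n = 2 ^ k * m + 2 ^ k - 1 := by
  rcases mod_two_cases n with hm | hm
  · exact ⟨0, n, h, hm, by ring⟩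
  · have h2 : (0:Int) < 2 := by norm_num
    rw [PySem.Int.mod_eq_emod_of_pos h2] at hm
    have hpos : 0 < n := by omega
    have hfe : PySem.Int.floordiv n 2 = n / 2 := PySem.Int.floordiv_eq_ediv_of_pos h2
    obtain ⟨k, m, hm0, hme, heq⟩ := decomp (PySem.Int.floordiv n 2) (by rw [hfe]; omega)
    refine ⟨k + 1, m, hm0, hme, ?_⟩
    have hn2 : n = 2 * PySem.Int.floordiv n 2 + 1 := by rw [hfe]; omega
    rw [hn2, heq]; ring
termination_by n.toNat
decreasing_by
  rw [PySem.Int.floordiv_eq_ediv_of_pos (by norm_num : (0:Int) < 2)]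
  omega

theorem set_append_len_succ (t' : List Char) (c x : Char) (rest : List Char) :
    (t' ++ c :: rest).set (t'.length + 1) x = t' ++ c :: rest.set 0 x := by
  induction t' with
  | nil => rfl
  | cons a t ih => simp [List.set_cons_succ, ih]

theorem scanA_spec (k : Nat) : ∀ (t' extra : List Char) (idx : Int),
    scanA (t' ++ '0' :: (List.replicate k '1' ++ extra))
          (t' ++ '0' :: (List.replicate k '1' ++ extra))
          ((t'.length : Int) + k) idx
      = (t' ++ '1' :: (List.replicate k '1' ++ extra), (t'.length : Int)) := by
  induction k with
  | zero =>
      intro t' extra idx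
      simp only [List.replicate, Nat.cast_zero, add_zero, List.nil_append]
      rw [scanA, dif_pos (by omega : (0:Int) ≤ (t'.length : Int)),
          PySem.List.pyGet?_append_length, if_pos rfl]
      simp
  | succ k ih =>
      intro t' extra idx
      have h0 : (0:Int) ≤ (t'.length : Int) + ((k+1 : Nat) : Int) := by omega
      have hcond : PySem.List.pyGet? (t' ++ '0' :: (List.replicate (k+1) '1' ++ extra))
          ((t'.length : Int) + ((k+1 : Nat) : Int)) = some '1' := by
        rw [PySem.List.pyGet?_of_nonneg _ h0]
        have htn : ((t'.length : Int) + ((k+1 : Nat) : Int)).toNat = t'.length + (k+1) := by omega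
        rw [htn, List.getElem?_append_right (by simp)]
        simp
      rw [scanA, dif_pos h0, hcond, if_neg (by simp)]
      have harith : (t'.length : Int) + ((k+1 : Nat) : Int) - 1 = (t'.length : Int) + (k : Int) := by
        push_cast; ring
      have hs : List.replicate (k+1) '1' ++ extra = List.replicate k '1' ++ ('1' :: extra) := by
        rw [List.replicate_succ']; simp
      rw [harith, hs, ih t' ('1' :: extra) idx, ← hs]

theorem valA_general (l : List Char) : ∀ (i : Nat) (tmp : Int), i ≤ l.length →
    valA l ((i : Int) - 1) tmp = tmp + valChars (l.take i) * 2 ^ (l.length - i) := by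
  intro i
  induction i with
  | zero =>
      intro tmp _
      rw [valA, dif_neg (by omega)]
      simp [valChars]
  | succ i ih =>
      intro tmp hle
      have hi : i < l.length := by omega
      have hc : ((i + 1 : Nat) : Int) - 1 = (i : Int) := by push_cast; ring
      rw [hc, valA, dif_pos (by omega : (0:Int) ≤ (i : Int))]
      have hgd : PySem.List.pyGetD l ((i : Nat) : Int) ' ' = l[i] := by
        rw [PySem.List.pyGetD_eq_getElem _ _ (by omega) (by exact_mod_cast hi)]
        simp
      rw [hgd]
      have hexp : (PySem.List.len l - 1 - (i : Int)).toNat = l.length - (i + 1) := by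
        simp only [PySem.List.len_eq]; omega
      rw [hexp, ih _ (by omega)]
      have hd : (PySem.Int.ofChars? [l[i]]).getD 0 = digitA l[i] := rfl
      have htake : l.take (i + 1) = l.take i ++ [l[i]] := by
        rw [List.take_add_one]
        simp [List.getElem?_eq_getElem hi]
      rw [hd, htake, valChars_append, valChars_singleton]
      simp only [List.length_singleton, pow_one]
      have hpow : l.length - i = (l.length - (i + 1)) + 1 := by omega
      rw [hpow, pow_succ]
      ring

theorem valA_spec (l : List Char) : valA l (PySem.List.len l - 1) 0 = valChars l := by
  have h : PySem.List.len l - 1 = ((l.length : Nat) : Int) - 1 := by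
    simp [PySem.List.len_eq]
  rw [h, valA_general l l.length 0 le_rfl]
  simp

theorem lowAux_spec (k : Nat) : ∀ (m low : Int), 0 ≤ m → PySem.Int.mod m 2 = 0 →
    lowAux (2 ^ k * m + 2 ^ k - 1) low = low * 2 ^ k := by
  induction k with
  | zero =>
      intro m low h0 he
      have harg : (2:Int) ^ 0 * m + 2 ^ 0 - 1 = m := by ring
      rw [harg, lowAux, dif_neg (by intro hcl; rw [he] at hcl; exact absurd hcl.2 (by norm_num))]
      ring
  | succ k ih =>
      intro m low h0 he
      have hpk : (0:Int) < 2 ^ k := by positivity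
      have h1 : (1:Int) ≤ 2 ^ k := hpk
      have hmn : (0:Int) ≤ 2 ^ k * m := mul_nonneg hpk.le h0
      have harg : (2:Int) ^ (k+1) * m + 2 ^ (k+1) - 1 = 2 * (2 ^ k * m + 2 ^ k - 1) + 1 := by ring
      set x : Int := 2 ^ k * m + 2 ^ k - 1 with hxdef
      have hx : (0:Int) ≤ x := by rw [hxdef]; linarith
      have hf : PySem.Int.floordiv (2 * x + 1) 2 = x := by
        rw [PySem.Int.floordiv_eq_ediv_of_pos (by norm_num : (0:Int) < 2)]; omega
      have hm1 : PySem.Int.mod (2 * x + 1) 2 = 1 := by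
        rw [PySem.Int.mod_eq_emod_of_pos (by norm_num : (0:Int) < 2)]; omega
      rw [harg, lowAux, dif_pos ⟨by omega, hm1⟩, hf, hxdef, ih m (low * 2) h0 he]
      ring

theorem exists_prefix (m : Int) (hm : 0 ≤ m) (he : PySem.Int.mod m 2 = 0) :
    ∃ t' : List Char, '0' :: binary m = t' ++ ['0'] ∧ 2 * valChars t' = m := by
  by_cases h0 : m = 0
  · exact ⟨[], by simp [h0, binary_nonpos le_rfl], by simp [valChars, h0]⟩
  · have hpos : 0 < m := by omega
    have h2 : (0:Int) < 2 := by norm_num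
    have hrec : (0:Int) ≤ PySem.Int.floordiv m 2 := by
      rw [PySem.Int.floordiv_eq_ediv_of_pos h2]; omega
    refine ⟨'0' :: binary (PySem.Int.floordiv m 2), ?_, ?_⟩
    · rw [binary_pos hpos, he, show PySem.Int.toChars (0:Int) = ['0'] from by decide]
      simp
    · rw [valChars_cons, digitA_zero, valChars_binary _ hrec]
      have hkey := PySem.Int.floordiv_mul_add_mod m 2
      rw [he] at hkey
      omega

theorem stepA_eq_nextNum (n : Int) : stepA n = nextNum n := by
  by_cases hn : n ≤ 0
  · rw [nextNum, if_pos hn]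
    have hb : binary n = [] := binary_nonpos hn
    have hscan := scanA_spec 0 [] [] 0
    simp only [List.replicate, Nat.cast_zero, add_zero, List.nil_append,
      List.length_nil] at hscan
    simp only [stepA, hb]
    rw [show PySem.List.len ['0'] - 1 = (0:Int) from by simp [PySem.List.len_eq], hscan]
    rw [if_neg (by simp [PySem.List.len_eq])]
    rw [valA_spec]
    decide
  · replace hn : 0 < n := lt_of_not_ge hn
    obtain ⟨k, m, hm0, hme, hdec⟩ := decomp n hn.le
    obtain ⟨t', hpre, hval⟩ := exists_prefix m hm0 hme
    have hbin : '0' :: binary n = t' ++ '0' :: List.replicate k '1' := by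
      rw [hdec, binary_decomp k m hm0,
          show ('0' :: (binary m ++ List.replicate k '1')) = ('0' :: binary m) ++ List.replicate k '1' from rfl,
          hpre]
      simp
    have hscan := scanA_spec k t' [] 0
    simp only [List.append_nil] at hscan
    have hi : PySem.List.len (t' ++ '0' :: List.replicate k '1') - 1 = (t'.length : Int) + k := by
      simp [PySem.List.len_eq]
      omega
    simp only [stepA, hbin]
    rw [hi, hscan]
    dsimp only
    cases k with
    | zero =>
        rw [if_neg (by simp [PySem.List.len_eq])]
        rw [valA_spec]
        simp only [List.replicate]
        rw [valChars_append, valChars_singleton, digitA_one]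
        rw [nextNum, if_neg (by omega)]
        have hlow := lowAux_spec 0 m 1 hm0 hme
        rw [← hdec] at hlow
        rw [hlow]
        dsimp only
        have hfd : PySem.Int.floordiv (1 * 2 ^ (0:Nat)) 2 = 0 := by decide
        rw [hfd, hdec]
        simp only [List.length_singleton, pow_one, pow_zero]
        omega
    | succ j =>
        rw [if_pos (by simp [PySem.List.len_eq])]
        have hset : PySem.List.pySetD (t' ++ '1' :: List.replicate (j+1) '1') ((t'.length : Int) + 1) '0'
            = t' ++ '1' :: '0' :: List.replicate j '1' := by
          rw [show ((t'.length : Int) + 1) = ((t'.length + 1 : Nat) : Int) from by push_cast; ring,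
              PySem.List.pySetD_natCast]
          rw [set_append_len_succ]
          simp [List.replicate_succ]
        rw [hset, valA_spec]
        rw [valChars_append, valChars_cons, valChars_cons, valChars_replicate_one, digitA_one,
            digitA_zero]
        simp only [List.length_cons, List.length_replicate]
        rw [nextNum, if_neg (by omega)]
        have hlow := lowAux_spec (j+1) m 1 hm0 hme
        rw [← hdec] at hlow
        rw [hlow]
        have hfd : PySem.Int.floordiv (1 * 2 ^ (j+1)) 2 = 2 ^ j := by
          rw [one_mul, pow_succ, PySem.Int.floordiv_eq_ediv_of_pos (by norm_num : (0:Int) < 2)]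
          exact Int.mul_ediv_cancel _ (by norm_num)
        dsimp only
        rw [hfd, hdec, ← hval]
        ring

theorem foldl_append_map (l : List Int) : ∀ acc : List Int,
    l.foldl (fun answer number => answer ++ [stepA number]) acc = acc ++ l.map stepA := by
  induction l with
  | nil => intro acc; simp
  | cons x l ih => intro acc; simp [ih]

-- ===== VERDICT (by name: the statement is the Claim_ definition above) =====
theorem solution_spec : Claim_equal_solution := by
  intro numbers _
  unfold Spec_solution solution solution_alt
  rw [foldl_append_map, List.nil_append]
  exact List.map_congr_left (fun x _ => stepA_eq_nextNum x)
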